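-- pv_equiv track=rewrite | github.com/TranTienDat265/cpp | Tai_lieu/Code/nvnamson_timkytuthuk.py | find_kth_character
-- ===== SOURCE A (Python) =====
-- def find_kth_character(initial_string, K):
--     n = len(initial_string)
--
--     # Tìm độ dài xâu sau các lần mở rộng
--     while K > n:
--         n *= 2
--
--     # Truy tìm vị trí ký tự thứ K
--     while K > len(initial_string):
--         if K > n // 2:
--             K -= (n // 2)
--             if K == 1:
--                 K = n // 2
--             else:
--                 K -= 1
--
--         n //= 2
--
--     return initial_string[K - 1]
-- ===== SOURCE B (Python) =====
-- def _levels(L, K):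
--     """Number of doublings of a block of length L needed to reach K."""
--     if K <= L or L <= 0:
--         return 0
--     return 1 + _levels(2 * L, K)
--
--
-- def _descend(L, K, t):
--     """Map position K in the t-times-doubled string down to a base position."""
--     if t == 0:
--         return K
--     h = L << (t - 1)
--     if K <= h:
--         return _descend(L, K, t - 1)
--     r = K - h - 1
--     return _descend(L, h if r == 0 else r, t - 1)
--
--
-- def find_kth_character(initial_string, K):
--     L = len(initial_string)
--     if K <= L:
--         return initial_string[K - 1]
--     t = _levels(L, K)
--     return initial_string[_descend(L, K, t) - 1]
-- ===== Notes on version B (the rewrite author's own statement) =====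
-- stated objective: alternative
-- what changed: Replaced A's two imperative while loops (one doubling n in place, one peeling K while halving n in place) by a recursive decomposition: a recursive helper counts the doubling levels, and a second structural recursion over the levels maps K down to a base index, recomputing each half length h = L << (t-1) instead of mutating n.
import Mathlib
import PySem

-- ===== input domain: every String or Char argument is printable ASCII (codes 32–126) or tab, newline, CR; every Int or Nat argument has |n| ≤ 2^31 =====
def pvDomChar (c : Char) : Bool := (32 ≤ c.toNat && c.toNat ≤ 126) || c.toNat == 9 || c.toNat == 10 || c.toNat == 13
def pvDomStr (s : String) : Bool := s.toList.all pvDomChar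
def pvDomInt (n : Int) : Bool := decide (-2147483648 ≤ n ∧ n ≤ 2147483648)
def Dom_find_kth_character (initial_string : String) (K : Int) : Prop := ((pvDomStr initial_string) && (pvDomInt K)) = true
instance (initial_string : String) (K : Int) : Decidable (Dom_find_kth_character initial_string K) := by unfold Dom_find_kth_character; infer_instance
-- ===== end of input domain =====

-- B replaces A's two in-place while loops by a recursive decomposition (level count + structural
-- recursion over the levels); objective: alternative, not faster.

-- ===== PORT A =====
-- while K > n: n *= 2   (fuel only makes the loop total; inside Pre_ the fuel is never exhausted)
def pvAGrow (fuel : Nat) (K n : Int) : Int :=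
  match fuel with
  | 0 => n
  | f + 1 => if n < K then pvAGrow f K (n * 2) else n

-- while K > len(s): …; n //= 2   (returns the final K; fuel as above)
def pvAShrink (fuel : Nat) (L K n : Int) : Int :=
  match fuel with
  | 0 => K
  | f + 1 =>
    if L < K then
      let K' := if PySem.Int.floordiv n 2 < K then
                  (let K2 := K - PySem.Int.floordiv n 2
                   if K2 = 1 then PySem.Int.floordiv n 2 else K2 - 1)
                else K
      pvAShrink f L K' (PySem.Int.floordiv n 2)
    else K

def find_kth_character (initial_string : String) (K : Int) : String :=
  let L : Int := (initial_string.toList.length : Int)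
  let n := pvAGrow (K.toNat + 1) K L
  let Kf := pvAShrink (K.toNat + 1) L K n
  match PySem.Str.pyGet? initial_string (Kf - 1) with   -- initial_string[K - 1]
  | some c => String.ofList [c]
  | none => ""   -- IndexError; excluded by Pre_

-- ===== PORT B =====
-- def _levels(L, K): number of doublings of a block of length L needed to reach K
-- (the 'L ≤ 0' guard only makes the recursion total, exactly as in Source B)
def pvBLevels (L K : Int) : Nat :=
  if K ≤ L ∨ L ≤ 0 then 0
  else 1 + pvBLevels (2 * L) K
termination_by (K - L).toNat
decreasing_by omega

-- def _descend(L, K, t): map position K in the t-times-doubled string down to a base position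
-- (h = L << (t-1) is L * 2^(t-1), exact for 0 ≤ L)
def pvBDescend (L K : Int) (t : Nat) : Int :=
  match t with
  | 0 => K
  | t + 1 =>
    let h := L * 2 ^ t
    if K ≤ h then pvBDescend L K t
    else
      let r := K - h - 1
      pvBDescend L (if r = 0 then h else r) t

def find_kth_character_alt (initial_string : String) (K : Int) : String :=
  let L : Int := (initial_string.toList.length : Int)
  if K ≤ L then
    match PySem.Str.pyGet? initial_string (K - 1) with
    | some c => String.ofList [c]
    | none => ""
  else
    let t := pvBLevels L K
    match PySem.Str.pyGet? initial_string (pvBDescend L K t - 1) with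
    | some c => String.ofList [c]
    | none => ""

-- ===== PRECONDITION & SPEC =====
-- Pre_ excludes only inputs where Python A does not return: the empty string (A loops forever for
-- K > 0 and raises IndexError otherwise) and K < 1 - len (IndexError on the final negative index).
def Pre_find_kth_character (initial_string : String) (K : Int) : Prop :=
  1 ≤ initial_string.toList.length ∧ 1 - (initial_string.toList.length : Int) ≤ K
instance (initial_string : String) (K : Int) : Decidable (Pre_find_kth_character initial_string K) := by
  unfold Pre_find_kth_character; infer_instance

def pvWitness_find_kth_character : String × Int := ("ab", 3)

def Spec_find_kth_character (initial_string : String) (K : Int) (out : String) : Prop := out = find_kth_character_alt initial_string K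
instance (initial_string : String) (K : Int) (out : String) : Decidable (Spec_find_kth_character initial_string K out) := by unfold Spec_find_kth_character; infer_instance

-- ===== CLAIM (what is proved, stated in full; the proofs are below) =====
def Claim_equal_find_kth_character : Prop := ∀ (initial_string : String) (K : Int), Dom_find_kth_character initial_string K → Pre_find_kth_character initial_string K → Spec_find_kth_character initial_string K (find_kth_character initial_string K)

-- ===== LEMMAS AND PROOFS =====

-- A's doubling loop computes L · 2^(B's level count), given enough fuel.
theorem pvGrow_eq (fuel : Nat) : ∀ (K n : Int), 1 ≤ n → K ≤ n * 2 ^ fuel →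
    pvAGrow fuel K n = n * 2 ^ (pvBLevels n K) := by
  induction fuel with
  | zero =>
    intro K n hn hf
    rw [pvBLevels]
    simp only [pow_zero, mul_one] at hf ⊢
    simp [pvAGrow, hf]
  | succ f ih =>
    intro K n hn hf
    by_cases h : n < K
    · rw [pvBLevels]
      have hcond : ¬ (K ≤ n ∨ n ≤ 0) := by omega
      rw [if_neg hcond]
      have hf' : K ≤ (n * 2) * 2 ^ f := by
        calc K ≤ n * 2 ^ (f + 1) := hf
        _ = (n * 2) * 2 ^ f := by ring
      have := ih K (n * 2) (by omega) hf'
      simp only [pvAGrow, if_pos h]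
      rw [this]; ring
    · rw [pvBLevels]
      have hcond : (K ≤ n ∨ n ≤ 0) := by omega
      rw [if_pos hcond]
      simp [pvAGrow, h]

theorem pvDescend_of_le (L K : Int) (t : Nat) (hL : 1 ≤ L) (hK : K ≤ L) :
    pvBDescend L K t = K := by
  induction t with
  | zero => rfl
  | succ t ih =>
    have h2 : (1 : Int) ≤ 2 ^ t := one_le_pow₀ (by norm_num)
    have hh : K ≤ L * 2 ^ t := by nlinarith
    simp only [pvBDescend, if_pos hh]
    exact ih

-- A's peeling loop equals B's level descent, given enough fuel.
theorem pvShrink_eq (t : Nat) : ∀ (fuel : Nat) (L K : Int), 1 ≤ L → 1 ≤ K →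
    K ≤ L * 2 ^ t → t ≤ fuel → pvAShrink fuel L K (L * 2 ^ t) = pvBDescend L K t := by
  induction t with
  | zero =>
    intro fuel L K hL hK ht _
    simp only [pow_zero, mul_one] at ht
    cases fuel with
    | zero => rfl
    | succ f => simp [pvAShrink, pvBDescend, not_lt.mpr ht]
  | succ t ih =>
    intro fuel L K hL hK hKn hfuel
    cases fuel with
    | zero => omega
    | succ f =>
      have h2 : (1 : Int) ≤ 2 ^ t := one_le_pow₀ (by norm_num)
      have hh1 : 1 ≤ L * 2 ^ t := by nlinarith
      have hfd : PySem.Int.floordiv (L * 2 ^ (t + 1)) 2 = L * 2 ^ t := by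
        rw [PySem.Int.floordiv_eq_ediv_of_pos (by norm_num)]
        have : L * 2 ^ (t + 1) = 2 * (L * 2 ^ t) := by ring
        rw [this, Int.mul_ediv_cancel_left _ (by norm_num)]
      by_cases hKL : K ≤ L
      · -- loop exits immediately; B descends with K unchanged
        simp only [pvAShrink, if_neg (not_lt.mpr hKL)]
        have hKh : K ≤ L * 2 ^ t := by nlinarith
        simp only [pvBDescend, if_pos hKh]
        exact (pvDescend_of_le L K t hL hKL).symm
      · push_neg at hKL
        have h2h : L * 2 ^ (t + 1) = 2 * (L * 2 ^ t) := by ring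
        simp only [pvAShrink, if_pos hKL, hfd]
        by_cases hsecond : L * 2 ^ t < K
        · -- second half
          rw [if_pos hsecond]
          simp only [pvBDescend, if_neg (not_le.mpr hsecond)]
          by_cases hone : K - L * 2 ^ t = 1
          · rw [if_pos hone, if_pos (by omega : K - L * 2 ^ t - 1 = 0)]
            exact ih f L (L * 2 ^ t) hL hh1 le_rfl (by omega)
          · rw [if_neg hone, if_neg (by omega : ¬ K - L * 2 ^ t - 1 = 0)]
            exact ih f L (K - L * 2 ^ t - 1) hL (by omega) (by omega) (by omega)
        · -- first half
          rw [if_neg hsecond]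
          push_neg at hsecond
          simp only [pvBDescend, if_pos hsecond]
          exact ih f L K hL hK hsecond (by omega)

theorem pvLevels_le (L K : Int) : pvBLevels L K ≤ (K - L).toNat := by
  induction L using pvBLevels.induct (K := K) with
  | case1 x h => rw [pvBLevels, if_pos h]; omega
  | case2 x h ih => rw [pvBLevels, if_neg h]; omega

theorem pvLevels_ge (L K : Int) : 1 ≤ L → K ≤ L * 2 ^ (pvBLevels L K) := by
  induction L using pvBLevels.induct (K := K) with
  | case1 x h =>
    intro hL
    rw [pvBLevels, if_pos h]
    have hKL : K ≤ x := by omega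
    simpa using hKL
  | case2 x h ih =>
    intro hL
    rw [pvBLevels, if_neg h]
    have := ih (by omega)
    calc K ≤ 2 * x * 2 ^ (pvBLevels (2 * x) K) := this
    _ = x * 2 ^ (1 + pvBLevels (2 * x) K) := by ring

-- ===== VERDICT (by name: the statement is the Claim_ definition above) =====
theorem find_kth_character_spec : Claim_equal_find_kth_character := by
  intro s K _hDom hPre
  unfold Spec_find_kth_character find_kth_character find_kth_character_alt
  obtain ⟨hL, _hlow⟩ := hPre
  set L : Int := (s.toList.length : Int) with hLdef
  have hL1 : 1 ≤ L := by rw [hLdef]; exact_mod_cast hL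
  by_cases hKL : K ≤ L
  · -- both loops are no-ops; both sides index with K - 1
    simp only [pvAGrow, if_neg (not_lt.mpr hKL), pvAShrink, if_pos hKL]
  · push_neg at hKL
    have hK1 : 1 ≤ K := by omega
    have hKnat : (K.toNat : Int) = K := Int.toNat_of_nonneg (by omega)
    have hpow : K ≤ L * 2 ^ (K.toNat + 1) := by
      have h1 : K.toNat < 2 ^ K.toNat := Nat.lt_two_pow_self
      have h2 : (K : Int) < 2 ^ K.toNat := by
        rw [← hKnat]; exact_mod_cast h1
      have h3 : (1 : Int) ≤ 2 ^ K.toNat := one_le_pow₀ (by norm_num)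
      have : (2 : Int) ^ (K.toNat + 1) = 2 * 2 ^ K.toNat := by ring
      nlinarith
    have hgrow : pvAGrow (K.toNat + 1) K L = L * 2 ^ (pvBLevels L K) :=
      pvGrow_eq (K.toNat + 1) K L hL1 hpow
    have hlev : pvBLevels L K ≤ K.toNat + 1 := by
      have := pvLevels_le L K
      omega
    have hshrink : pvAShrink (K.toNat + 1) L K (L * 2 ^ (pvBLevels L K)) =
        pvBDescend L K (pvBLevels L K) :=
      pvShrink_eq (pvBLevels L K) (K.toNat + 1) L K hL1 hK1 (pvLevels_ge L K hL1) hlev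
    simp only [if_neg (not_le.mpr hKL), hgrow, hshrink]
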